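-- pv_equiv track=rewrite | github.com/derrickhu/game2D_huahua | scripts/process_pill_buttons_sheet_4x2.py | axis_segments
-- ===== SOURCE A (Python) =====
-- def axis_segments(total: int, count: int) -> list[tuple[int, int]]:
--     base = total // count
--     rem = total % count
--     out: list[tuple[int, int]] = []
--     pos = 0
--     for i in range(count):
--         sz = base + (1 if i < rem else 0)
--         out.append((pos, sz))
--         pos += sz
--     assert pos == total, (pos, total)
--     return out
-- ===== SOURCE B (Python) =====
-- def axis_segments(total: int, count: int) -> list[tuple[int, int]]:
--     base, rem = divmod(total, count)
--     return [(i * base + min(i, rem), base + (1 if i < rem else 0))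
--             for i in range(count)]
-- ===== Notes on version B (the rewrite author's own statement) =====
-- stated objective: alternative
-- what changed: Replaces the loop with a running position accumulator by a comprehension that computes each segment's start directly from its index via the closed form i*base + min(i, rem).
import Mathlib
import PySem

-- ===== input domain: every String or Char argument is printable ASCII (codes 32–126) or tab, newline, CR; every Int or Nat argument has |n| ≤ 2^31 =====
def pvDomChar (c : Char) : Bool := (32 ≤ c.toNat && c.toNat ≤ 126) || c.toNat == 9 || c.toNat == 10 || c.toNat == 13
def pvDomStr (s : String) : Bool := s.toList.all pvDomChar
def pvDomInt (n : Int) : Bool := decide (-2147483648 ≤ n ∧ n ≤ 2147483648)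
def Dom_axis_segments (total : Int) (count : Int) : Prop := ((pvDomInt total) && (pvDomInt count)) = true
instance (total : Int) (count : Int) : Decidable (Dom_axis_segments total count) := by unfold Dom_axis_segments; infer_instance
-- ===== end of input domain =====

-- B computes each segment's start by the closed form i*base + min(i, rem) instead of A's running position accumulator (alternative decomposition, same cost).


-- ===== PORT A =====
-- Loop over range(count) keeping (out, pos); the trailing assert raises exactly
-- outside Pre_ below, so the port returns out unconditionally.
def axis_segments (total : Int) (count : Int) : List (Int × Int) :=
  let base := PySem.Int.floordiv total count
  let rem := PySem.Int.mod total count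
  let s := (PySem.List.pyRange 0 count 1).foldl
    (fun (s : List (Int × Int) × Int) i =>
      let sz := base + (if i < rem then 1 else 0)
      (s.1 ++ [(s.2, sz)], s.2 + sz))
    ([], 0)
  s.1

-- ===== PORT B =====
def axis_segments_alt (total : Int) (count : Int) : List (Int × Int) :=
  let base := PySem.Int.floordiv total count
  let rem := PySem.Int.mod total count
  (PySem.List.pyRange 0 count 1).map
    (fun i => (i * base + min i rem, base + (if i < rem then 1 else 0)))

-- ===== PRECONDITION & SPEC =====
-- Pre_ excludes exactly the inputs where Python A raises: count = 0 (ZeroDivisionError)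
-- and count < 0 with total ≠ 0 (the loop never runs and the assert pos == total fails).
def Pre_axis_segments (total : Int) (count : Int) : Prop :=
  count ≠ 0 ∧ (0 < count ∨ total = 0)
instance (total : Int) (count : Int) : Decidable (Pre_axis_segments total count) := by
  unfold Pre_axis_segments; infer_instance

def pvWitness_axis_segments : Int × Int := (10, 3)


def Spec_axis_segments (total : Int) (count : Int) (out : List (Int × Int)) : Prop := out = axis_segments_alt total count
instance (total : Int) (count : Int) (out : List (Int × Int)) : Decidable (Spec_axis_segments total count out) := by unfold Spec_axis_segments; infer_instance

-- ===== CLAIM (what is proved, stated in full; the proofs are below) =====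
def Claim_equal_axis_segments : Prop := ∀ (total : Int) (count : Int), Dom_axis_segments total count → Pre_axis_segments total count → Spec_axis_segments total count (axis_segments total count)

-- ===== LEMMAS AND PROOFS =====

-- A's fold with a running position equals the closed-form map, for any start
-- function st satisfying the step recurrence st (i+1) = st i + sz i.
theorem fold_pos_eq_map (sz st : Int → Int)
    (hst : ∀ i : Int, st (i + 1) = st i + sz i) :
    ∀ (n : Nat) (a : Int) (acc : List (Int × Int)), a + n = b →
    (PySem.List.pyRange a b 1).foldl
      (fun (s : List (Int × Int) × Int) i => (s.1 ++ [(s.2, sz i)], s.2 + sz i))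
      (acc, st a)
    = (acc ++ (PySem.List.pyRange a b 1).map (fun i => (st i, sz i)), st b) := by
  intro n
  induction n with
  | zero =>
    intro a acc hab
    have hb : b = a := by omega
    subst hb
    simp [PySem.List.pyRange]
  | succ m ih =>
    intro a acc hab
    have hlt : a < b := by omega
    rw [PySem.List.pyRange_one_cons hlt]
    simp only [List.foldl_cons, List.map_cons]
    have hstep : st a + sz a = st (a + 1) := (hst a).symm
    rw [hstep, ih (a + 1) (acc ++ [(st a, sz a)]) (by omega)]
    simp

-- The closed-form start satisfies the recurrence.
theorem closed_form_step (base rem : Int) (i : Int) :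
    (i + 1) * base + min (i + 1) rem
      = (i * base + min i rem) + (base + (if i < rem then 1 else 0)) := by
  by_cases h : i < rem
  · have h1 : min i rem = i := by omega
    have h2 : min (i + 1) rem = i + 1 := by omega
    simp [h, h1]; ring
  · have h1 : min i rem = rem := by omega
    have h2 : min (i + 1) rem = rem := by omega
    simp [h, h1, h2]; ring

-- ===== VERDICT (by name: the statement is the Claim_ definition above) =====
theorem axis_segments_spec : Claim_equal_axis_segments := by
  intro total count _ _
  unfold Spec_axis_segments axis_segments axis_segments_alt
  set base := PySem.Int.floordiv total count with hbase
  set rem := PySem.Int.mod total count with hrem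
  by_cases hc : 0 < count
  · have hrnn : 0 ≤ rem := PySem.Int.mod_nonneg total hc
    have h := fold_pos_eq_map (b := count)
      (fun i => base + (if i < rem then 1 else 0))
      (fun i => i * base + min i rem)
      (fun i => closed_form_step base rem i)
      count.toNat 0 [] (by omega)
    simp only [zero_mul, zero_add, min_eq_left hrnn, List.nil_append] at h
    simp [h]
  · have hb : count ≤ 0 := by omega
    have hemp : PySem.List.pyRange 0 count 1 = [] := by
      simp [PySem.List.pyRange]
      omega
    simp [hemp]
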